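-- pv_equiv track=rewrite | github.com/seantauber/mathboard | src/utils/latex_utils.py | validate_latex
-- ===== SOURCE A (Python) =====
-- def validate_latex(expression: str) -> bool:
--     """Validate LaTeX expression for basic syntax."""
--     delimiters = {
--         '{': '}',
--         '[': ']',
--         '(': ')',
--         r'\left': r'\right'
--     }
--
--     # Check all delimiter pairs
--     for opening, closing in delimiters.items():
--         if expression.count(opening) != expression.count(closing):
--             return False
--
--     # Check proper nesting with stack
--     stack = []
--     simple_delimiters = {'{': '}', '[': ']', '(': ')'}
--
--     for char in expression:
--         if char in simple_delimiters:
--             stack.append(char)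
--         elif char in simple_delimiters.values():
--             if not stack or char != simple_delimiters[stack.pop()]:
--                 return False
--
--     return len(stack) == 0
-- ===== SOURCE B (Python) =====
-- def validate_latex(expression: str) -> bool:
--     """Validate LaTeX expression for basic syntax (single left-to-right pass)."""
--     pairs = {'}': '{', ']': '[', ')': '('}
--     stack = []
--     left = right = 0
--     for i, ch in enumerate(expression):
--         if ch in '{[(':
--             stack.append(ch)
--         elif ch in '}])':
--             if not stack or stack.pop() != pairs[ch]:
--                 return False
--         elif ch == '\\':
--             if expression.startswith('left', i + 1):
--                 left += 1
--             elif expression.startswith('right', i + 1):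
--                 right += 1
--     return not stack and left == right
-- ===== Notes on version B (the rewrite author's own statement) =====
-- stated objective: faster
-- what changed: B replaces A's eight full .count scans followed by a separate nesting pass with one single left-to-right pass that maintains the bracket stack and counts \left/\right via startswith at each backslash.
import Mathlib
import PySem

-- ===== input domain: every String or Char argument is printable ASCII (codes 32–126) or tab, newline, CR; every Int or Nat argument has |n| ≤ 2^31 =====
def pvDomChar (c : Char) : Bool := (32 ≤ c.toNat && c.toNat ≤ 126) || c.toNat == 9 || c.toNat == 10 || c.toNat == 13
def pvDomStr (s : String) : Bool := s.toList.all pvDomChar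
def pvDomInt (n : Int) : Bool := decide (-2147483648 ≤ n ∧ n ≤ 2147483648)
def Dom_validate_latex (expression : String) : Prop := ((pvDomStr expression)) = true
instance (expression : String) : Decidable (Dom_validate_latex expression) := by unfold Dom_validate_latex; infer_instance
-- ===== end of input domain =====

-- B replaces A's eight full .count scans plus a separate nesting pass with one
-- single left-to-right pass (stack + two counters); return values agree everywhere.

-- ===== PORT A =====
-- simple_delimiters lookup: simple_delimiters[stack.pop()] (only ever applied to pushed openers)
def pvPartner (c : Char) : Char :=
  if c = '{' then '}' else if c = '[' then ']' else if c = '(' then ')' else ' '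

-- the 'for char in expression' nesting loop of A (stack kept as a list, top in front)
def pvNest : List Char → List Char → Bool
  | [], stack => stack.isEmpty
  | c :: rest, stack =>
    if c = '{' ∨ c = '[' ∨ c = '(' then pvNest rest (c :: stack)
    else if c = '}' ∨ c = ']' ∨ c = ')' then
      match stack with
      | [] => false
      | top :: st => if c ≠ pvPartner top then false else pvNest rest st
    else pvNest rest stack

def validate_latex (expression : String) : Bool :=
  -- the dict iteration: four count comparisons in insertion order
  if PySem.Str.count expression "{" ≠ PySem.Str.count expression "}" then false
  else if PySem.Str.count expression "[" ≠ PySem.Str.count expression "]" then false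
  else if PySem.Str.count expression "(" ≠ PySem.Str.count expression ")" then false
  else if PySem.Str.count expression "\\left" ≠ PySem.Str.count expression "\\right" then false
  else pvNest expression.toList []

-- ===== PORT B =====
-- pairs[ch] of Source B
def pvOpener (c : Char) : Char :=
  if c = '}' then '{' else if c = ']' then '[' else if c = ')' then '(' else ' '

-- the single pass of Source B: stack + left/right counters; at '\\' the startswith
-- checks look at the remaining characters (expression.startswith('left', i+1))
def pvScan : List Char → List Char → Nat → Nat → Bool
  | [], stack, l, r => stack.isEmpty && (l == r)
  | c :: rest, stack, l, r =>
    if c = '{' ∨ c = '[' ∨ c = '(' then pvScan rest (c :: stack) l r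
    else if c = '}' ∨ c = ']' ∨ c = ')' then
      match stack with
      | [] => false
      | top :: st => if top ≠ pvOpener c then false else pvScan rest st l r
    else if c = '\\' then
      if ['l','e','f','t'].isPrefixOf rest then pvScan rest stack (l + 1) r
      else if ['r','i','g','h','t'].isPrefixOf rest then pvScan rest stack l (r + 1)
      else pvScan rest stack l r
    else pvScan rest stack l r

def validate_latex_alt (expression : String) : Bool :=
  pvScan expression.toList [] 0 0

-- ===== PRECONDITION & SPEC =====
def Spec_validate_latex (expression : String) (out : Bool) : Prop := out = validate_latex_alt expression
instance (expression : String) (out : Bool) : Decidable (Spec_validate_latex expression out) := by unfold Spec_validate_latex; infer_instance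

-- ===== CLAIM (what is proved, stated in full; the proofs are below) =====
def Claim_equal_validate_latex : Prop := ∀ (expression : String), Dom_validate_latex expression → Spec_validate_latex expression (validate_latex expression)

-- ===== LEMMAS AND PROOFS =====

-- number of indices of s at which sub starts (helper for the proofs only)
def pvOcc (sub : List Char) : List Char → Nat
  | [] => 0
  | c :: rest => (if sub.isPrefixOf (c :: rest) then 1 else 0) + pvOcc sub rest

theorem pvPrefix_head_false {a c : Char} (tl rest : List Char) (h : a ≠ c) :
    List.isPrefixOf (a :: tl) (c :: rest) = false := by
  simp [List.isPrefixOf]; intro h'; exact absurd h' h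

theorem pvPrefix_bs (tl rest : List Char) :
    List.isPrefixOf ('\\' :: tl) ('\\' :: rest) = List.isPrefixOf tl rest := by
  simp [List.isPrefixOf]

-- PySem.Chars.count on a single-character pattern counts the character
theorem pvCount_single (c : Char) : ∀ (fuel : Nat) (s : List Char) (acc : Nat),
    s.length ≤ fuel → PySem.Chars.count.go [c] fuel s acc = acc + s.count c := by
  intro fuel
  induction fuel with
  | zero => intro s acc h; cases s with
    | nil => simp [PySem.Chars.count.go]
    | cons a t => simp at h
  | succ n ih =>
    intro s acc h
    cases s with
    | nil => simp [PySem.Chars.count.go]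
    | cons a t =>
      simp only [List.length_cons, Nat.succ_le_succ_iff] at h
      by_cases hc : a = c
      · have hp : List.isPrefixOf [c] (a :: t) = true := by
          simp [List.isPrefixOf, hc]
        simp [PySem.Chars.count.go, hc, ih t (acc + 1) h]
        omega
      · have hp : List.isPrefixOf [c] (a :: t) = false := by
          simp [List.isPrefixOf]; exact fun h' => hc h'.symm
        simp [PySem.Chars.count.go, hp, ih t acc h, hc]

theorem pvCount_char (s : List Char) (c : Char) :
    PySem.Chars.count s [c] = s.count c := by
  simp [PySem.Chars.count, List.isEmpty]
  simpa using pvCount_single c s.length s 0 le_rfl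

-- occurrences of '\'::tl cannot start inside a block that contains no '\'
theorem pvOcc_no_bs (tl : List Char) : ∀ (t r : List Char), (∀ a ∈ t, a ≠ '\\') →
    pvOcc ('\\' :: tl) (t ++ r) = pvOcc ('\\' :: tl) r := by
  intro t
  induction t with
  | nil => intro r _; simp
  | cons a t ih =>
    intro r h
    have ha : a ≠ '\\' := h a (by simp)
    have hp : List.isPrefixOf ('\\' :: tl) (a :: (t ++ r)) = false :=
      pvPrefix_head_false tl (t ++ r) (fun h' => ha h'.symm)
    simp [pvOcc, hp]
    exact ih r (fun x hx => h x (by simp [hx]))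

-- PySem.Chars.count for a backslash-headed pattern whose tail has no backslash
-- equals the per-index occurrence count (occurrences cannot overlap)
theorem pvCount_go_occ (tl : List Char) (hbs : ∀ a ∈ tl, a ≠ '\\') :
    ∀ (fuel : Nat) (s : List Char) (acc : Nat), s.length ≤ fuel →
    PySem.Chars.count.go ('\\' :: tl) fuel s acc = acc + pvOcc ('\\' :: tl) s := by
  intro fuel
  induction fuel with
  | zero => intro s acc h; cases s with
    | nil => simp [PySem.Chars.count.go, pvOcc]
    | cons a t => simp at h
  | succ n ih =>
    intro s acc h
    cases s with
    | nil => simp [PySem.Chars.count.go, pvOcc]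
    | cons a t =>
      simp only [List.length_cons, Nat.succ_le_succ_iff] at h
      by_cases hp : List.isPrefixOf ('\\' :: tl) (a :: t) = true
      · obtain ⟨rest, hrest⟩ := List.isPrefixOf_iff_prefix.mp hp
        have hdrop : List.drop (('\\' :: tl).length) (a :: t) = rest := by
          rw [← hrest]; simp
        have hlen : rest.length ≤ n := by
          have := congrArg List.length hrest
          simp at this; omega
        rw [PySem.Chars.count.go, if_pos hp, hdrop, ih rest (acc + 1) hlen]
        have hocc : pvOcc ('\\' :: tl) (a :: t) = 1 + pvOcc ('\\' :: tl) rest := by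
          rw [← hrest]
          have hp2 : List.isPrefixOf ('\\' :: tl) ('\\' :: (tl ++ rest)) = true :=
            List.isPrefixOf_iff_prefix.mpr ⟨rest, by simp⟩
          calc pvOcc ('\\' :: tl) ('\\' :: tl ++ rest)
              = 1 + pvOcc ('\\' :: tl) (tl ++ rest) := by
                simp only [List.cons_append, pvOcc, hp2, if_true]
            _ = 1 + pvOcc ('\\' :: tl) rest := by rw [pvOcc_no_bs tl tl rest hbs]
        omega
      · rw [PySem.Chars.count.go, if_neg hp, ih t acc h]
        simp [pvOcc, hp]

theorem pvCount_pattern (s tl : List Char) (hbs : ∀ a ∈ tl, a ≠ '\\') :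
    PySem.Chars.count s ('\\' :: tl) = pvOcc ('\\' :: tl) s := by
  simp [PySem.Chars.count, List.isEmpty]
  simpa using pvCount_go_occ tl hbs s.length s 0 le_rfl

-- the single pass equals A's nesting loop together with the occurrence counts
theorem pvScan_eq (cs : List Char) : ∀ (stack : List Char) (l r : Nat),
    pvScan cs stack l r
      = (pvNest cs stack
         && ((l + pvOcc ['\\','l','e','f','t'] cs)
              == (r + pvOcc ['\\','r','i','g','h','t'] cs))) := by
  induction cs with
  | nil => intro stack l r; simp [pvScan, pvNest, pvOcc, Bool.and_comm]
  | cons c rest ih =>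
    intro stack l r
    by_cases ho : c = '{' ∨ c = '[' ∨ c = '('
    · have hnb : '\\' ≠ c := by rcases ho with h|h|h <;> simp [h]
      have hpl := pvPrefix_head_false (a := '\\') ['l','e','f','t'] rest hnb
      have hpr := pvPrefix_head_false (a := '\\') ['r','i','g','h','t'] rest hnb
      simp [pvScan, pvNest, ho, pvOcc, hpl, hpr, ih]
    · by_cases hc : c = '}' ∨ c = ']' ∨ c = ')'
      · have hnb : '\\' ≠ c := by rcases hc with h|h|h <;> simp [h]
        have hpl := pvPrefix_head_false (a := '\\') ['l','e','f','t'] rest hnb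
        have hpr := pvPrefix_head_false (a := '\\') ['r','i','g','h','t'] rest hnb
        cases stack with
        | nil => simp [pvScan, pvNest, ho, hc]
        | cons top st =>
          have hkey : (top ≠ pvOpener c) ↔ (c ≠ pvPartner top) := by
            rcases hc with h3|h3|h3 <;> subst h3 <;>
              by_cases h4 : top = '{' <;> by_cases h5 : top = '[' <;>
                by_cases h6 : top = '(' <;>
                simp [pvOpener, pvPartner, h4, h5, h6]
          by_cases hm : top = pvOpener c
          · have hm2 : ¬ (c ≠ pvPartner top) := fun h => (hkey.mpr h) hm
            simp only [pvScan, pvNest, if_neg (by tauto : ¬(c = '{' ∨ c = '[' ∨ c = '(')),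
              if_pos hc]
            rw [if_neg (by simpa using hm), if_neg hm2, ih, pvOcc, pvOcc, hpl, hpr]
            simp
          · have hm2 : c ≠ pvPartner top := hkey.mp hm
            simp [pvScan, pvNest, ho, hc, hm, hm2]
      · by_cases hb : c = '\\'
        · subst hb
          by_cases hl : List.isPrefixOf ['l','e','f','t'] rest = true
          · have hpl : List.isPrefixOf ['\\','l','e','f','t'] ('\\' :: rest) = true := by
              rw [pvPrefix_bs]; exact hl
            have hpr : List.isPrefixOf ['\\','r','i','g','h','t'] ('\\' :: rest) = false := by
              rw [pvPrefix_bs]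
              cases rest with
              | nil => simp at hl
              | cons x xs =>
                have hx : x = 'l' := by simp [List.isPrefixOf] at hl; exact hl.1.symm
                exact pvPrefix_head_false ['i','g','h','t'] xs (by simp [hx])
            simp [pvScan, pvNest, hl, pvOcc, hpl, hpr, ih, Nat.add_assoc]
          · by_cases hr : List.isPrefixOf ['r','i','g','h','t'] rest = true
            · have hpr : List.isPrefixOf ['\\','r','i','g','h','t'] ('\\' :: rest) = true := by
                rw [pvPrefix_bs]; exact hr
              have hpl : List.isPrefixOf ['\\','l','e','f','t'] ('\\' :: rest) = false := by
                rw [pvPrefix_bs]; exact Bool.eq_false_iff.mpr hl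
              simp [pvScan, pvNest, hl, hr, pvOcc, hpl, hpr, ih, Nat.add_assoc]
            · have hpl : List.isPrefixOf ['\\','l','e','f','t'] ('\\' :: rest) = false := by
                rw [pvPrefix_bs]; exact Bool.eq_false_iff.mpr hl
              have hpr : List.isPrefixOf ['\\','r','i','g','h','t'] ('\\' :: rest) = false := by
                rw [pvPrefix_bs]; exact Bool.eq_false_iff.mpr hr
              simp [pvScan, pvNest, hl, hr, pvOcc, hpl, hpr, ih]
        · have hnb : '\\' ≠ c := fun h => hb h.symm
          have hpl := pvPrefix_head_false (a := '\\') ['l','e','f','t'] rest hnb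
          have hpr := pvPrefix_head_false (a := '\\') ['r','i','g','h','t'] rest hnb
          simp [pvScan, pvNest, ho, hc, hb, pvOcc, hpl, hpr, ih]

-- a successful nesting pass forces equal counts of each simple delimiter pair
theorem pvNest_counts (o : Char) (ho : o = '{' ∨ o = '[' ∨ o = '(') :
    ∀ (cs stack : List Char), pvNest cs stack = true →
    stack.count o + cs.count o = cs.count (pvPartner o) := by
  intro cs
  induction cs with
  | nil =>
    intro stack h
    simp [pvNest, List.isEmpty_iff] at h
    subst h; simp
  | cons c rest ih =>
    intro stack h
    by_cases hop : c = '{' ∨ c = '[' ∨ c = '('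
    · simp only [pvNest] at h; rw [if_pos hop] at h
      have := ih (c :: stack) h
      have hcl : c ≠ pvPartner o := by
        rcases ho with h1|h1|h1 <;> rcases hop with h2|h2|h2 <;> simp [h1, h2, pvPartner]
      simp [List.count_cons, hcl] at this ⊢
      by_cases hco : c = o <;> simp [hco] at this ⊢ <;> omega
    · by_cases hcc : c = '}' ∨ c = ']' ∨ c = ')'
      · simp only [pvNest] at h; rw [if_neg (by tauto), if_pos hcc] at h
        cases stack with
        | nil => simp at h
        | cons top st =>
          have h' : (if c ≠ pvPartner top then false else pvNest rest st) = true := h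
          by_cases hne : c ≠ pvPartner top
          · rw [if_pos hne] at h'; simp at h'
          · rw [if_neg hne] at h'
            replace h := h'
            replace hne := not_ne_iff.mp hne
            have := ih st h
            have hco : c ≠ o := by
              rcases ho with h1|h1|h1 <;> rcases hcc with h2|h2|h2 <;> simp [h1, h2]
            have hkey : (top = o) ↔ (c = pvPartner o) := by
              subst hne
              constructor
              · intro h'; rw [h']
              · intro h'
                rcases ho with h1|h1|h1 <;> rw [h1] at h' ⊢ <;>
                  by_cases h4 : top = '{' <;> by_cases h5 : top = '[' <;>
                    by_cases h6 : top = '(' <;>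
                    simp [pvPartner, h4, h5, h6] at h' ⊢
            have hpo : pvPartner o ≠ o := by rcases ho with h|h|h <;> simp [h, pvPartner]
            by_cases hto : top = o
            · simp [hto, hkey.mp hto, hpo] at this ⊢
              omega
            · have hcp : c ≠ pvPartner o := fun h' => hto (hkey.mpr h')
              simp [hto, hco, hcp] at this ⊢
              omega
      · simp only [pvNest] at h; rw [if_neg (by tauto), if_neg (by tauto)] at h
        have := ih stack h
        have h1 : c ≠ o := by rcases ho with h'|h'|h' <;> simp [h'] at hop ⊢ <;> tauto
        have h2 : c ≠ pvPartner o := by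
          rcases ho with h'|h'|h' <;> simp [h', pvPartner] at hcc ⊢ <;> tauto
        simp [h1, h2]
        omega

-- ===== VERDICT (by name: the statement is the Claim_ definition above) =====
theorem validate_latex_spec : Claim_equal_validate_latex := by
  intro e _
  unfold Spec_validate_latex validate_latex validate_latex_alt
  rw [pvScan_eq]
  have hl : PySem.Str.count e "\\left" = pvOcc ['\\','l','e','f','t'] e.toList := by
    rw [PySem.Str.count_eq, show "\\left".toList = '\\' :: ['l','e','f','t'] by decide]
    exact pvCount_pattern e.toList _ (by simp)
  have hr : PySem.Str.count e "\\right" = pvOcc ['\\','r','i','g','h','t'] e.toList := by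
    rw [PySem.Str.count_eq, show "\\right".toList = '\\' :: ['r','i','g','h','t'] by decide]
    exact pvCount_pattern e.toList _ (by simp)
  have e1 : PySem.Str.count e "{" = e.toList.count '{' := by
    rw [PySem.Str.count_eq, show "{".toList = ['{'] by decide]; exact pvCount_char _ _
  have e2 : PySem.Str.count e "}" = e.toList.count '}' := by
    rw [PySem.Str.count_eq, show "}".toList = ['}'] by decide]; exact pvCount_char _ _
  have e3 : PySem.Str.count e "[" = e.toList.count '[' := by
    rw [PySem.Str.count_eq, show "[".toList = ['['] by decide]; exact pvCount_char _ _
  have e4 : PySem.Str.count e "]" = e.toList.count ']' := by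
    rw [PySem.Str.count_eq, show "]".toList = [']'] by decide]; exact pvCount_char _ _
  have e5 : PySem.Str.count e "(" = e.toList.count '(' := by
    rw [PySem.Str.count_eq, show "(".toList = ['('] by decide]; exact pvCount_char _ _
  have e6 : PySem.Str.count e ")" = e.toList.count ')' := by
    rw [PySem.Str.count_eq, show ")".toList = [')'] by decide]; exact pvCount_char _ _
  by_cases hn : pvNest e.toList [] = true
  · have c1 := pvNest_counts '{' (by tauto) e.toList [] hn
    have c2 := pvNest_counts '[' (by tauto) e.toList [] hn
    have c3 := pvNest_counts '(' (by tauto) e.toList [] hn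
    simp only [show pvPartner '{' = '}' by decide, show pvPartner '[' = ']' by decide,
      show pvPartner '(' = ')' by decide, List.count_nil, Nat.zero_add] at c1 c2 c3
    split_ifs with h1 h2 h3 h4
    · exact absurd (by rw [e1, e2, c1]) h1
    · exact absurd (by rw [e3, e4, c2]) h2
    · exact absurd (by rw [e5, e6, c3]) h3
    · rw [hl, hr] at h4
      simp [hn]
      omega
    · rw [hl, hr] at h4
      simp [hn, not_ne_iff.mp h4]
  · simp only [Bool.not_eq_true] at hn
    split_ifs <;> simp [hn]
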